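-- pv_equiv track=rewrite | github.com/dmhernandez2525/gmail-organizer | gmail_organizer/priority.py | get_priority_stats
-- ===== SOURCE A (Python) =====
-- from collections import Counter, defaultdict
-- from typing import Dict, List, Optional, Tuple
--
-- def get_priority_stats(scored_emails: List[Tuple]) -> Dict:
--     """Get priority distribution stats"""
--     levels = Counter()
--     for _, score, level in scored_emails:
--         levels[level] += 1
--
--     return {
--         'high': levels.get('high', 0),
--         'medium': levels.get('medium', 0),
--         'low': levels.get('low', 0),
--         'total': len(scored_emails)
--     }
-- ===== SOURCE B (Python) =====
-- def get_priority_stats(scored_emails):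
--     """Get priority distribution stats"""
--     return {
--         'high': sum(1 for _, _, level in scored_emails if level == 'high'),
--         'medium': sum(1 for _, _, level in scored_emails if level == 'medium'),
--         'low': sum(1 for _, _, level in scored_emails if level == 'low'),
--         'total': len(scored_emails)
--     }
-- ===== Notes on version B (the rewrite author's own statement) =====
-- stated objective: idiomatic
-- what changed: Replaces A's single-pass Counter table (build a level->count index, then read three keys) with three independent filtered generator scans plus len(), with no intermediate dictionary.
import Mathlib
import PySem

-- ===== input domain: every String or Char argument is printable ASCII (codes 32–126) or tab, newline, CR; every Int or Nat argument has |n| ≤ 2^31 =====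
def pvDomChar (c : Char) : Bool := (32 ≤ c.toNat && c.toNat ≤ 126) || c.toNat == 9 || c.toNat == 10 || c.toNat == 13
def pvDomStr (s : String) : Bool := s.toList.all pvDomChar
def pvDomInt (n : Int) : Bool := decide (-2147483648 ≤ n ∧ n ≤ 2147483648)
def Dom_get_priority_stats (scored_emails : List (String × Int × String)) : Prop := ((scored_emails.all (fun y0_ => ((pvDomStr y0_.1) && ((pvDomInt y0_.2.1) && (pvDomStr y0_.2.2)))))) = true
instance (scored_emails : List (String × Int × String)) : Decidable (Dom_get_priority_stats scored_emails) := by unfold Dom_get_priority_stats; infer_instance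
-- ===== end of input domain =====

-- ===== PORT A =====
-- Header: B replaces A's Counter build-then-read with three independent filtered scans (idiomatic, same O(n) cost).
def get_priority_stats (scored_emails : List (String × Int × String)) : List (String × Int) :=
  let levels : PySem.Dict String Int :=
    scored_emails.foldl (fun d t => d.modify t.2.2 0 (· + 1)) PySem.Dict.empty
  [("high", levels.getD "high" 0),
   ("medium", levels.getD "medium" 0),
   ("low", levels.getD "low" 0),
   ("total", (scored_emails.length : Int))]

-- ===== PORT B =====
def get_priority_stats_alt (scored_emails : List (String × Int × String)) : List (String × Int) :=
  [("high", ((scored_emails.countP (fun t => t.2.2 == "high")) : Int)),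
   ("medium", ((scored_emails.countP (fun t => t.2.2 == "medium")) : Int)),
   ("low", ((scored_emails.countP (fun t => t.2.2 == "low")) : Int)),
   ("total", (scored_emails.length : Int))]

-- ===== PRECONDITION & SPEC =====
def Spec_get_priority_stats (scored_emails : List (String × Int × String)) (out : List (String × Int)) : Prop := out = get_priority_stats_alt scored_emails
instance (scored_emails : List (String × Int × String)) (out : List (String × Int)) : Decidable (Spec_get_priority_stats scored_emails out) := by unfold Spec_get_priority_stats; infer_instance

-- ===== CLAIM (what is proved, stated in full; the proofs are below) =====
def Claim_equal_get_priority_stats : Prop := ∀ (scored_emails : List (String × Int × String)), Dom_get_priority_stats scored_emails → Spec_get_priority_stats scored_emails (get_priority_stats scored_emails)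

-- ===== LEMMAS AND PROOFS =====

-- ===== VERDICT (by name: the statement is the Claim_ definition above) =====
-- Each Counter lookup in A equals the direct filtered count B computes for that level.
theorem counter_getD_eq_countP (l : List (String × Int × String)) (v : String)
    (d : PySem.Dict String Int) :
    (l.foldl (fun d t => d.modify t.2.2 0 (· + 1)) d).getD v 0
      = d.getD v 0 + ((l.countP (fun t => t.2.2 == v)) : Int) := by
  induction l generalizing d with
  | nil => simp
  | cons t l ih =>
    simp only [List.foldl_cons, ih, List.countP_cons, PySem.Dict.getD_modify]
    by_cases h : v = t.2.2
    · simp [h]; ring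
    · simp [h, Ne.symm h]

theorem get_priority_stats_spec : Claim_equal_get_priority_stats := by
  intro l _
  unfold Spec_get_priority_stats get_priority_stats get_priority_stats_alt
  simp [counter_getD_eq_countP]
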